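-- pv_equiv track=rewrite | github.com/Matheus-Campos/hangman-game | src/game.py | find_letters_in_word
-- ===== SOURCE A (Python) =====
-- def find_letters_in_word(letter, word):
--   if letter not in word:
--     return None
--
--   indexes = []
--   for index in range(len(list(word))):
--     if word[index] == letter:
--       indexes.append(index)
--
--   return indexes
-- ===== SOURCE B (Python) =====
-- def find_letters_in_word(letter, word):
--     i = word.find(letter)
--     if i == -1:
--         return None
--     indexes = []
--     while i != -1:
--         indexes.append(i)
--         i = word.find(letter, i + 1)
--     return indexes
-- ===== Notes on version B (the rewrite author's own statement) =====
-- stated objective: alternative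
-- what changed: B replaces A's membership guard plus per-index equality loop by repeated str.find calls that jump from one occurrence directly to the next, returning None when the first find yields -1.
-- intended difference: When letter is not a single character (empty or multi-character) but occurs as a substring of word, A returns [] although its comparison loop matched no position; B returns the list of positions where the substring occurs, the intended answer to 'where does it occur'. — e.g. on find_letters_in_word("ab", "abc"): A returns some [], B returns some [0]
import Mathlib
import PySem

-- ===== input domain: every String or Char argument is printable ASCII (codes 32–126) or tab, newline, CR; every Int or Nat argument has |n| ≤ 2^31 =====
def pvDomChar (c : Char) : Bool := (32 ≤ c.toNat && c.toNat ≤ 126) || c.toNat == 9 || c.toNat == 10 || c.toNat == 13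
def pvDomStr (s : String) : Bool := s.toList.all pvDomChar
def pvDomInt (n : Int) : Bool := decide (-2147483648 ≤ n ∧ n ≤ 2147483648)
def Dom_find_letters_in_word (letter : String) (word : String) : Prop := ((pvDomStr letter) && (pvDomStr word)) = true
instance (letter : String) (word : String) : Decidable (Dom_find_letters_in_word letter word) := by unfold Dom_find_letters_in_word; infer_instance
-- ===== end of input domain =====

-- B replaces A's membership guard + per-index comparison loop by repeated str.find jumps from one
-- occurrence directly to the next (alternative decomposition; return value only, no mutation).

-- ===== PORT A =====
def find_letters_in_word (letter : String) (word : String) : Option (List Int) :=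
  -- 'if letter not in word: return None'
  if ¬ (PySem.Str.isIn letter word = true) then none
  else
    -- 'for index in range(len(list(word))): if word[index] == letter: indexes.append(index)'
    -- word[index] is the 1-character string at index (always in range), compared to letter by string equality
    let indexes := (PySem.List.pyRange 0 (PySem.List.len word.toList) 1).foldl
      (fun acc index =>
        if ((PySem.Str.pyGet? word index).map (fun c => String.ofList [c]) == some letter)
        then acc ++ [index] else acc) []
    some indexes

-- ===== PORT B =====
-- 'while i != -1: indexes.append(i); i = word.find(letter, i + 1)'
-- fuel: find(letter, i+1) returns -1 or an index > i and ≤ len(word), so the loop runs at most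
-- len(word) + 2 times; the fuel only makes this same computation total.
def pvFindLoop (letter : String) (word : String) : Nat → Int → List Int → List Int
  | 0, _, acc => acc
  | fuel + 1, i, acc =>
    if i = -1 then acc
    else pvFindLoop letter word fuel (PySem.Str.findFrom word letter (i + 1) none) (acc ++ [i])

def find_letters_in_word_alt (letter : String) (word : String) : Option (List Int) :=
  -- 'i = word.find(letter); if i == -1: return None'
  let i := PySem.Str.find word letter
  if i = -1 then none
  else some (pvFindLoop letter word (word.toList.length + 2) i [])

-- ===== PRECONDITION & SPEC =====
-- When letter is not a single character (empty or multi-character) but occurs as a substring of word,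
-- A returns [] although its comparison loop matched no position; B returns the positions where the
-- substring occurs, the intended 'where does it occur' answer.
def D_find_letters_in_word (letter : String) (word : String) : Prop :=
  letter.toList.length ≠ 1 ∧ PySem.Str.isIn letter word = true
instance (letter : String) (word : String) : Decidable (D_find_letters_in_word letter word) := by
  unfold D_find_letters_in_word; infer_instance

def Spec_find_letters_in_word (letter : String) (word : String) (out : Option (List Int)) : Prop :=
  ¬ D_find_letters_in_word letter word → out = find_letters_in_word_alt letter word
instance (letter : String) (word : String) (out : Option (List Int)) : Decidable (Spec_find_letters_in_word letter word out) := by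
  unfold Spec_find_letters_in_word; infer_instance

def pvDiffWitness_find_letters_in_word : String × String := ("ab", "abc")
def pvDiffWitnessOut_find_letters_in_word : (Option (List Int)) × (Option (List Int)) := (some [], some [0])

-- ===== CLAIM (what is proved, stated in full; the proofs are below) =====
def Claim_unchanged_find_letters_in_word : Prop := ∀ (letter : String) (word : String), Dom_find_letters_in_word letter word → Spec_find_letters_in_word letter word (find_letters_in_word letter word)
def Claim_changed_find_letters_in_word : Prop := Dom_find_letters_in_word (pvDiffWitness_find_letters_in_word.1) (pvDiffWitness_find_letters_in_word.2) ∧ D_find_letters_in_word (pvDiffWitness_find_letters_in_word.1) (pvDiffWitness_find_letters_in_word.2) ∧ find_letters_in_word (pvDiffWitness_find_letters_in_word.1) (pvDiffWitness_find_letters_in_word.2) = pvDiffWitnessOut_find_letters_in_word.1 ∧ find_letters_in_word_alt (pvDiffWitness_find_letters_in_word.1) (pvDiffWitness_find_letters_in_word.2) = pvDiffWitnessOut_find_letters_in_word.2 ∧ pvDiffWitnessOut_find_letters_in_word.1 ≠ pvDiffWitnessOut_find_letters_in_word.2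
def Claim_exact_find_letters_in_word : Prop := ∀ (letter : String) (word : String), Dom_find_letters_in_word letter word → D_find_letters_in_word letter word → find_letters_in_word letter word ≠ find_letters_in_word_alt letter word

-- ===== LEMMAS AND PROOFS =====

-- the list of indices j ≥ off (as Ints) at which the remaining suffix carries the character c
def pvOcc (c : Char) : List Char → Int → List Int
  | [], _ => []
  | d :: t, j => if d = c then j :: pvOcc c t (j + 1) else pvOcc c t (j + 1)

lemma ofList_singleton_eq_iff (c : Char) (letter : String) :
    String.ofList [c] = letter ↔ letter.toList = [c] := by
  constructor
  · intro h; rw [← h]; simp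
  · intro h; rw [← h]; exact String.ofList_toList

lemma singleton_prefix_drop (c : Char) (cs : List Char) (m : Nat) :
    [c] <+: cs.drop m ↔ ∃ h : m < cs.length, cs[m] = c := by
  constructor
  · rintro ⟨t, ht⟩
    have hm : m < cs.length := by
      by_contra h
      rw [List.drop_eq_nil_of_le (by omega)] at ht
      simp at ht
    refine ⟨hm, ?_⟩
    have := List.drop_eq_getElem_cons hm
    rw [this] at ht
    exact (List.cons.injEq _ _ _ _).mp ht |>.1.symm
  · rintro ⟨hm, hc⟩
    rw [List.drop_eq_getElem_cons hm, hc]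
    exact ⟨_, rfl⟩

lemma pvOcc_nil_of_not_mem (c : Char) (l : List Char) (j : Int) (h : c ∉ l) :
    pvOcc c l j = [] := by
  induction l generalizing j with
  | nil => rfl
  | cons d t ih =>
    simp only [List.mem_cons, not_or] at h
    simp only [pvOcc, if_neg (Ne.symm h.1)]
    exact ih (j + 1) h.2

-- splitting pvOcc at the first occurrence m ≥ k of c
lemma pvOcc_split (c : Char) (cs : List Char) :
    ∀ (d k m : Nat), m - k = d → k ≤ m → (hm : m < cs.length) → cs[m] = c →
    (∀ j (hj : j < cs.length), k ≤ j → j < m → cs[j] ≠ c) →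
    pvOcc c (cs.drop k) (k : Int) = (m : Int) :: pvOcc c (cs.drop (m + 1)) ((m : Int) + 1) := by
  intro d
  induction d with
  | zero =>
    intro k m hd hkm hm hc _
    have hk : k = m := by omega
    subst hk
    rw [List.drop_eq_getElem_cons hm, hc]
    simp only [pvOcc]
    norm_cast
  | succ d ih =>
    intro k m hd hkm hm hc hmin
    have hkn : k < cs.length := by omega
    rw [List.drop_eq_getElem_cons hkn]
    have hne : cs[k] ≠ c := hmin k hkn le_rfl (by omega)
    simp only [pvOcc, if_neg hne]
    have : (k : Int) + 1 = ((k + 1 : Nat) : Int) := by push_cast; ring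
    rw [this]
    exact ih (k + 1) m (by omega) (by omega) hm hc (fun j hj h1 h2 => hmin j hj (by omega) h2)

-- A's index loop collects exactly pvOcc when letter is the single character c
lemma afold_eq_pvOcc (letter word : String) (c : Char) (hc : letter.toList = [c]) :
    ∀ (d k : Nat), word.toList.length - k = d → k ≤ word.toList.length → ∀ (acc : List Int),
    (PySem.List.pyRange (k : Int) (word.toList.length : Int) 1).foldl
      (fun acc index =>
        if ((PySem.Str.pyGet? word index).map (fun ch => String.ofList [ch]) == some letter)
        then acc ++ [index] else acc) acc
    = acc ++ pvOcc c (word.toList.drop k) (k : Int) := by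
  intro d
  induction d with
  | zero =>
    intro k hd hk acc
    rw [PySem.List.pyRange_one_eq_nil (by omega), List.drop_eq_nil_of_le (by omega)]
    simp [pvOcc]
  | succ d ih =>
    intro k hd hk acc
    have hkn : k < word.toList.length := by omega
    rw [PySem.List.pyRange_one_cons (by exact_mod_cast hkn)]
    simp only [List.foldl_cons]
    have hget : PySem.Str.pyGet? word (k : Int) = some (word.toList[k]'hkn) := by
      simp only [PySem.Str.pyGet?_eq, PySem.Chars.pyGet?_eq_listPyGet?]
      exact PySem.List.pyGet?_eq_some_getElem _ (by positivity) (by exact_mod_cast hkn)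
    rw [hget]
    have hdrop := List.drop_eq_getElem_cons hkn
    have hcast : (k : Int) + 1 = ((k + 1 : Nat) : Int) := by push_cast; ring
    by_cases heq : word.toList[k]'hkn = c
    · have hcond : (some (word.toList[k]'hkn)).map (fun ch => String.ofList [ch]) == some letter := by
        simp only [Option.map, beq_iff_eq, Option.some.injEq]
        rw [ofList_singleton_eq_iff, hc, heq]
      rw [if_pos hcond, hdrop]
      simp only [pvOcc, if_pos heq]
      rw [hcast, ih (k + 1) (by omega) (by omega) (acc ++ [(k : Int)])]
      simp
    · have hcond : ¬ ((some (word.toList[k]'hkn)).map (fun ch => String.ofList [ch]) == some letter) = true := by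
        simp only [Option.map, beq_iff_eq, Option.some.injEq]
        rw [ofList_singleton_eq_iff, hc]
        intro h
        exact heq (((List.cons.injEq _ _ _ _).mp h).1).symm
      rw [if_neg hcond, hdrop]
      simp only [pvOcc, if_neg heq]
      rw [hcast, ih (k + 1) (by omega) (by omega) acc]

-- B's find-jumping loop also collects exactly pvOcc when letter is the single character c
lemma findLoop_eq_pvOcc (letter word : String) (c : Char) (hc : letter.toList = [c]) :
    ∀ (fuel : Nat) (k : Nat) (acc : List Int), k ≤ word.toList.length →
    word.toList.length + 1 - k ≤ fuel →
    pvFindLoop letter word fuel (PySem.Chars.findFrom word.toList letter.toList (k : Int) none) acc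
    = acc ++ pvOcc c (word.toList.drop k) (k : Int) := by
  intro fuel
  induction fuel with
  | zero => intro k acc hk hf; omega
  | succ fuel ih =>
    intro k acc hk hf
    by_cases hneg : PySem.Chars.findFrom word.toList letter.toList (k : Int) none = -1
    · rw [hneg]
      simp only [pvFindLoop]
      have hni : ¬ letter.toList <:+: word.toList.drop k :=
        (PySem.Chars.findFrom_natCast_eq_neg_one_iff _ _ k hk).mp hneg
      have hnm : c ∉ word.toList.drop k := by
        intro hmem
        obtain ⟨s, t, hst⟩ := List.append_of_mem hmem
        rw [hc] at hni
        exact hni ⟨s, t, by rw [hst]; simp⟩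
      rw [pvOcc_nil_of_not_mem c _ _ hnm]
      simp
    · obtain ⟨h1, h2, h3⟩ := PySem.Chars.findFrom_natCast_spec word.toList letter.toList k hk hneg
      set i := PySem.Chars.findFrom word.toList letter.toList (k : Int) none with hi
      have hi0 : 0 ≤ i := le_trans (Int.natCast_nonneg k) h1
      set m := i.toNat with hmdef
      have him : i = (m : Int) := by omega
      rw [hc] at h2 h3
      obtain ⟨hmlt, hmc⟩ := (singleton_prefix_drop c word.toList m).mp h2
      simp only [pvFindLoop, if_neg hneg]
      have hmin : ∀ j (hj : j < word.toList.length), k ≤ j → j < m → word.toList[j] ≠ c := by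
        intro j hj hkj hjm hjc
        exact h3 j hkj hjm ((singleton_prefix_drop c word.toList j).mpr ⟨hj, hjc⟩)
      have hsplit := pvOcc_split c word.toList (m - k) k m rfl (by omega) hmlt hmc hmin
      rw [hsplit, him]
      have hcast : (m : Int) + 1 = ((m + 1 : Nat) : Int) := by push_cast; ring
      have hstep : PySem.Str.findFrom word letter ((m : Int) + 1) none
          = PySem.Chars.findFrom word.toList letter.toList (((m + 1 : Nat) : Int)) none := by
        rw [PySem.Str.findFrom_eq, hcast]
      rw [hstep, ih (m + 1) (acc ++ [(m : Int)]) (by omega) (by omega)]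
      push_cast
      simp

-- prefix invariant of the loop: B's list inside D is nonempty
lemma findLoop_prefix (letter word : String) :
    ∀ (fuel : Nat) (i : Int) (acc : List Int), acc <+: pvFindLoop letter word fuel i acc := by
  intro fuel
  induction fuel with
  | zero => intro i acc; exact List.prefix_refl _
  | succ fuel ih =>
    intro i acc
    simp only [pvFindLoop]
    split
    · exact List.prefix_refl _
    · exact (List.prefix_append _ _).trans (ih _ _)

-- A's loop collects nothing when letter is not a single character
lemma afold_nil_of_len_ne_one (letter word : String) (h : letter.toList.length ≠ 1) :
    (PySem.List.pyRange 0 (PySem.List.len word.toList) 1).foldl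
      (fun acc index =>
        if ((PySem.Str.pyGet? word index).map (fun ch => String.ofList [ch]) == some letter)
        then acc ++ [index] else acc) []
    = [] := by
  rw [PySem.List.foldl_append_if_eq_filter]
  simp only [List.nil_append, List.filter_eq_nil_iff]
  intro j hj hcond
  rw [PySem.List.mem_pyRange_one] at hj
  simp only [PySem.List.len_eq] at hj
  have hget : PySem.Str.pyGet? word j = some (word.toList[j.toNat]'(by omega)) := by
    simp only [PySem.Str.pyGet?_eq, PySem.Chars.pyGet?_eq_listPyGet?]
    exact PySem.List.pyGet?_eq_some_getElem _ hj.1 (by simpa using hj.2)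
  rw [hget] at hcond
  simp only [Option.map, beq_iff_eq, Option.some.injEq] at hcond
  rw [ofList_singleton_eq_iff] at hcond
  exact h (by rw [hcond]; rfl)

-- a run of the loop starting from a nonempty accumulator stays nonempty
lemma findLoop_ne_nil (letter word : String) (fuel : Nat) (i : Int) (acc : List Int)
    (hacc : acc ≠ []) : pvFindLoop letter word fuel i acc ≠ [] := by
  intro hnil
  have hpre := findLoop_prefix letter word fuel i acc
  rw [hnil] at hpre
  exact hacc (List.prefix_nil.mp hpre)

-- ===== VERDICT (by name: the statement is the Claim_ definition above) =====
theorem find_letters_in_word_spec : Claim_unchanged_find_letters_in_word := by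
  intro letter word _ hnD
  unfold D_find_letters_in_word at hnD
  show find_letters_in_word letter word = find_letters_in_word_alt letter word
  by_cases hin : PySem.Str.isIn letter word = true
  · have hlen : letter.toList.length = 1 := by
      by_contra h; exact hnD ⟨h, hin⟩
    obtain ⟨c, hc⟩ := List.length_eq_one_iff.mp hlen
    have hinf : letter.toList <:+: word.toList := (PySem.Str.isIn_iff_infix _ _).mp hin
    have hfind : ¬ PySem.Str.find word letter = -1 := by
      rw [PySem.Str.find_eq]
      exact (PySem.Chars.find_ne_neg_one_iff _ _).mpr hinf
    have hB := findLoop_eq_pvOcc letter word c hc (word.toList.length + 2) 0 [] (by omega) (by omega)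
    simp only [Nat.cast_zero, PySem.Chars.findFrom_zero, List.drop_zero, List.nil_append] at hB
    rw [← PySem.Str.find_eq] at hB
    have hA := afold_eq_pvOcc letter word c hc word.toList.length 0 rfl (by omega) []
    simp only [Nat.cast_zero, List.drop_zero, List.nil_append] at hA
    simp only [find_letters_in_word, find_letters_in_word_alt, hin, not_true_eq_false,
      if_false, if_neg hfind, PySem.List.len_eq]
    rw [hA, hB]
  · have hinf : ¬ letter.toList <:+: word.toList :=
      fun hinf => hin ((PySem.Str.isIn_iff_infix _ _).mpr hinf)
    have hin' : PySem.Chars.isIn letter.toList word.toList = false :=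
      (PySem.Chars.isIn_eq_false_iff _ _).mpr hinf
    have hfindC : PySem.Chars.find word.toList letter.toList = -1 :=
      (PySem.Chars.find_eq_neg_one_iff _ _).mpr hinf
    simp [find_letters_in_word, find_letters_in_word_alt, hin', hfindC]

theorem find_letters_in_word_changed : Claim_changed_find_letters_in_word := by
  unfold Claim_changed_find_letters_in_word; decide

theorem find_letters_in_word_tight : Claim_exact_find_letters_in_word := by
  intro letter word _ hD
  obtain ⟨hlen, hin⟩ := hD
  have hfind : ¬ PySem.Str.find word letter = -1 := by
    rw [PySem.Str.find_eq]
    exact (PySem.Chars.find_ne_neg_one_iff _ _).mpr ((PySem.Str.isIn_iff_infix _ _).mp hin)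
  simp only [find_letters_in_word, find_letters_in_word_alt, hin, not_true_eq_false,
    if_false, if_neg hfind]
  rw [afold_nil_of_len_ne_one letter word hlen]
  intro hcontra
  rw [Option.some.injEq] at hcontra
  have hnil := hcontra.symm
  simp only [pvFindLoop, if_neg hfind, List.nil_append] at hnil
  split at hnil
  · exact List.cons_ne_nil _ _ hnil
  · exact findLoop_ne_nil letter word _ _ _ (by simp) hnil
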